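-- pv_equiv track=rewrite | github.com/YangYuS8/study-python | practice/11-面向对象/1078.py | calmul
-- ===== SOURCE A (Python) =====
-- def calmul(x):
--     mul = 1
--     while x > 0:
--         digit = x % 10
--         if digit % 2 == 1:
--             mul *= digit
--         x //= 10
--     return mul
-- ===== SOURCE B (Python) =====
-- def calmul(x):
--     if x <= 0:
--         return 1
--     mul = 1
--     for c in str(x):
--         d = int(c)
--         if d % 2 == 1:
--             mul *= d
--     return mul
-- ===== Notes on version B (the rewrite author's own statement) =====
-- stated objective: idiomatic
-- what changed: B iterates over the characters of the decimal string str(x), most-significant digit first, instead of peeling digits arithmetically with mod/div in a while loop.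
import Mathlib
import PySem

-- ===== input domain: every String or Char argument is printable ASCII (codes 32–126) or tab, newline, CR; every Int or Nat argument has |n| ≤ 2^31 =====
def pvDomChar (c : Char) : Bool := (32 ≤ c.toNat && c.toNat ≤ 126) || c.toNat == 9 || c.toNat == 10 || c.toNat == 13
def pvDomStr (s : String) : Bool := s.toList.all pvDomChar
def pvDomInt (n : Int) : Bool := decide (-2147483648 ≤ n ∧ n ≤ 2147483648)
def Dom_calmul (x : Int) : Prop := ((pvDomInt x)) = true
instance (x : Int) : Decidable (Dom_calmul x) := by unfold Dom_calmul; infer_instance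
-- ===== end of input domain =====

-- B iterates over the characters of str(x) (most-significant digit first) instead of
-- peeling digits arithmetically with mod/div in a while loop (idiomatic rewrite).

-- ===== PORT A =====
-- the while loop of A, as recursion on the same state (x, mul)
def calmulLoop (x : Int) (mul : Int) : Int :=
  if x > 0 then
    let digit := PySem.Int.mod x 10
    calmulLoop (PySem.Int.floordiv x 10)
      (if PySem.Int.mod digit 2 = 1 then mul * digit else mul)
  else mul
termination_by x.toNat
decreasing_by
  rw [PySem.Int.floordiv_eq_ediv_of_pos (by norm_num)]
  omega

def calmul (x : Int) : Int := calmulLoop x 1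

-- ===== PORT B =====
-- the body of B's for-loop; `int(c)` for the decimal digit characters produced by
-- `str(x)` (x > 0) is ported by hand as `c.toNat - 48`, which is exact on '0'..'9'
def calmulStep (mul : Int) (c : Char) : Int :=
  let d : Int := (c.toNat : Int) - 48
  if PySem.Int.mod d 2 = 1 then mul * d else mul

def calmul_alt (x : Int) : Int :=
  if x ≤ 0 then 1
  else (PySem.Int.toStr x).toList.foldl calmulStep 1

-- ===== PRECONDITION & SPEC =====
def Spec_calmul (x : Int) (out : Int) : Prop := out = calmul_alt x
instance (x : Int) (out : Int) : Decidable (Spec_calmul x out) := by unfold Spec_calmul; infer_instance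

-- ===== CLAIM (what is proved, stated in full; the proofs are below) =====
def Claim_equal_calmul : Prop := ∀ (x : Int), Dom_calmul x → Spec_calmul x (calmul x)

-- ===== LEMMAS AND PROOFS =====

-- the product of the odd digits of n (abstract reference value)
def oddProd (n : Nat) : Int :=
  if _ : n = 0 then 1
  else (if n % 10 % 2 = 1 then ((n % 10 : Nat) : Int) else 1) * oddProd (n / 10)
termination_by n
decreasing_by omega

-- weight of one character in B's fold
def wsel (c : Char) : Int :=
  if ((c.toNat : Int) - 48) % 2 = 1 then (c.toNat : Int) - 48 else 1

theorem calmulStep_eq (mul : Int) (c : Char) : calmulStep mul c = mul * wsel c := by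
  simp only [calmulStep, wsel]
  rw [PySem.Int.mod_eq_emod_of_pos (by norm_num : (0:Int) < 2)]
  split <;> simp

theorem foldl_calmulStep (l : List Char) (a : Int) :
    l.foldl calmulStep a = a * (l.map wsel).prod := by
  induction l generalizing a with
  | nil => simp
  | cons c t ih => simp [calmulStep_eq, ih, mul_assoc]

theorem wsel_digitChar (d : Nat) (hd : d < 10) :
    wsel (Nat.digitChar d) = if d % 2 = 1 then (d : Int) else 1 := by
  interval_cases d <;> decide

theorem toDigitsCore_append (b : Nat) :
    ∀ (f n : Nat) (ds : List Char),
      Nat.toDigitsCore b f n ds = Nat.toDigitsCore b f n [] ++ ds := by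
  intro f
  induction f with
  | zero => intro n ds; simp [Nat.toDigitsCore]
  | succ f ih =>
    intro n ds
    simp only [Nat.toDigitsCore]
    split
    · simp
    · rw [ih (n / b) (_ :: ds), ih (n / b) (_ :: [])]
      simp

theorem prod_toDigitsCore :
    ∀ (f n : Nat), 0 < n → n < f →
      ((Nat.toDigitsCore 10 f n []).map wsel).prod = oddProd n := by
  intro f
  induction f with
  | zero => omega
  | succ f ih =>
    intro n hn hf
    simp only [Nat.toDigitsCore]
    have hz : oddProd n = (if n % 10 % 2 = 1 then ((n % 10 : Nat) : Int) else 1) * oddProd (n / 10) := by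
      rw [oddProd, dif_neg hn.ne']
    split
    · rename_i h0
      have h1 : oddProd (n / 10) = 1 := by rw [h0, oddProd]; simp
      rw [hz, h1, mul_one]
      simp only [List.map_cons, List.map_nil, List.prod_cons, List.prod_nil, mul_one]
      rw [wsel_digitChar (n % 10) (by omega)]
    · rename_i h0
      rw [toDigitsCore_append, List.map_append, List.prod_append,
          ih (n / 10) (by omega) (by omega)]
      simp only [List.map_cons, List.map_nil, List.prod_cons, List.prod_nil, mul_one]
      rw [wsel_digitChar (n % 10) (by omega), hz]
      split <;> ring

theorem calmulLoop_eq (x mul : Int) : calmulLoop x mul = mul * oddProd x.toNat := by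
  induction x, mul using calmulLoop.induct with
  | case1 x mul hx digit ih =>
    simp only [dite_eq_ite] at ih
    rw [calmulLoop, if_pos hx]
    show calmulLoop (PySem.Int.floordiv x 10)
        (if PySem.Int.mod (PySem.Int.mod x 10) 2 = 1 then mul * PySem.Int.mod x 10 else mul)
      = mul * oddProd x.toNat
    rw [ih]
    rw [PySem.Int.floordiv_eq_ediv_of_pos (by norm_num : (0:Int) < 10)]
    simp only [digit]
    rw [PySem.Int.mod_eq_emod_of_pos (by norm_num : (0:Int) < 10),
        PySem.Int.mod_eq_emod_of_pos (by norm_num : (0:Int) < 2)]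
    conv_rhs => rw [oddProd, dif_neg (by omega : x.toNat ≠ 0)]
    have h1 : (x / 10).toNat = x.toNat / 10 := by omega
    have h2 : x % 10 = ((x.toNat % 10 : Nat) : Int) := by omega
    rw [h1, h2]
    have h3 : ((x.toNat % 10 : Nat) : Int) % 2 = ((x.toNat % 10 % 2 : Nat) : Int) := by omega
    rw [h3]
    by_cases hodd : x.toNat % 10 % 2 = 1
    · rw [if_pos (by exact_mod_cast hodd), if_pos (by omega)]
      ring
    · rw [if_neg (fun h => hodd (by exact_mod_cast h)), if_neg (by omega)]
      ring
  | case2 x mul hx =>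
    rw [calmulLoop, if_neg hx]
    rw [oddProd, dif_pos (by omega : x.toNat = 0)]
    ring

-- ===== VERDICT (by name: the statement is the Claim_ definition above) =====
theorem calmul_spec : Claim_equal_calmul := by
  intro x _
  unfold Spec_calmul calmul calmul_alt
  rw [calmulLoop_eq, one_mul]
  by_cases hx : x ≤ 0
  · rw [if_pos hx, oddProd, dif_pos (by omega : x.toNat = 0)]
  · rw [if_neg hx]
    rw [PySem.Int.toList_toStr]
    unfold PySem.Int.toChars
    rw [if_neg (by omega : ¬ x < 0)]
    rw [foldl_calmulStep, one_mul]
    unfold Nat.toDigits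
    rw [prod_toDigitsCore (x.toNat + 1) x.toNat (by omega) (by omega)]
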